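-- pv_equiv track=rewrite | github.com/funwithscience-org/KEV-analysis | scripts/compute_cwe_families.py | family_for
-- ===== SOURCE A (Python) =====
-- CWE_FAMILIES: list[tuple[str, set[int]]] = [
--     ("memory_corruption", {119, 120, 122, 125, 190, 416, 476, 787, 824}),
--     ("injection",         {77, 78, 79, 89, 94, 917}),
--     ("auth",              {287, 269, 306, 862, 863}),
--     ("path_traversal",    {22, 23, 36}),
--     ("deserialization",   {502}),
--     ("info_disclosure",   {200, 209}),
--     ("ssrf",              {918}),
--     ("race",              {362}),
-- ]
--
-- def family_for(cwes: list[str]) -> str: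
--     """Return the family name for an entry's CWE list. First-match-wins."""
--     if not cwes:
--         return "unknown"
--     nums = []
--     for c in cwes:
--         if isinstance(c, str) and c.startswith("CWE-"):
--             try:
--                 nums.append(int(c.replace("CWE-", "")))
--             except ValueError:
--                 pass
--     if not nums:
--         return "unknown"
--     for fam, cwe_set in CWE_FAMILIES:
--         if any(n in cwe_set for n in nums):
--             return fam
--     return "other"
-- ===== SOURCE B (Python) =====
-- CWE_FAMILIES: list[tuple[str, set[int]]] = [
--     ("memory_corruption", {119, 120, 122, 125, 190, 416, 476, 787, 824}),
--     ("injection",         {77, 78, 79, 89, 94, 917}),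
--     ("auth",              {287, 269, 306, 862, 863}),
--     ("path_traversal",    {22, 23, 36}),
--     ("deserialization",   {502}),
--     ("info_disclosure",   {200, 209}),
--     ("ssrf",              {918}),
--     ("race",              {362}),
-- ]
--
-- # The family sets are disjoint, so each CWE number has a unique (rank, family).
-- CWE_TO_RANK: dict[int, tuple[int, str]] = {
--     n: (i, fam) for i, (fam, cwe_set) in enumerate(CWE_FAMILIES) for n in cwe_set
-- }
--
--
-- def family_for(cwes: list[str]) -> str:
--     """Return the family name for an entry's CWE list. First-match-wins."""
--     if not cwes:
--         return "unknown"
--     nums = []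
--     for c in cwes:
--         if isinstance(c, str) and c.startswith("CWE-"):
--             try:
--                 nums.append(int(c.replace("CWE-", "")))
--             except ValueError:
--                 pass
--     if not nums:
--         return "unknown"
--     best = None
--     for n in nums:
--         hit = CWE_TO_RANK.get(n)
--         if hit is not None and (best is None or hit[0] < best[0]):
--             best = hit
--     return best[1] if best is not None else "other"
-- ===== Notes on version B (the rewrite author's own statement) =====
-- stated objective: alternative
-- what changed: Replaces A's family-major scan (for each family in priority order, test any(n in set)) by a precomputed CWE->(rank, family) dictionary and a single number-major pass over the parsed CWEs that tracks the minimum family rank; the parsing loop is unchanged.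
import Mathlib
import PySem

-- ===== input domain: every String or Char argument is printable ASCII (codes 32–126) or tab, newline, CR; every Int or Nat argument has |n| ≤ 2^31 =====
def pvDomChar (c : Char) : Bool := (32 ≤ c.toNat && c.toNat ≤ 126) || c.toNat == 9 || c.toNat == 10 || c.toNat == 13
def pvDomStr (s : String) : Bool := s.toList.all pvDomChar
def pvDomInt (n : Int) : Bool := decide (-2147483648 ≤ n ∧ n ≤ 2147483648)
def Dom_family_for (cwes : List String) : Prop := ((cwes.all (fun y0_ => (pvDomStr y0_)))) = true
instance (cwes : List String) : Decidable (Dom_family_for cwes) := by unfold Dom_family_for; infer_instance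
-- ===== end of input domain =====

-- B replaces A's family-major scan (first family having any parsed CWE) by a precomputed
-- CWE→(rank, family) dictionary and one number-major pass tracking the minimum rank (objective: alternative).

-- ===== PORT A =====
def CWE_FAMILIES : List (String × PySem.Set Int) :=
  [("memory_corruption", PySem.Set.ofList [119, 120, 122, 125, 190, 416, 476, 787, 824]),
   ("injection",         PySem.Set.ofList [77, 78, 79, 89, 94, 917]),
   ("auth",              PySem.Set.ofList [287, 269, 306, 862, 863]),
   ("path_traversal",    PySem.Set.ofList [22, 23, 36]),
   ("deserialization",   PySem.Set.ofList [502]),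
   ("info_disclosure",   PySem.Set.ofList [200, 209]),
   ("ssrf",              PySem.Set.ofList [918]),
   ("race",              PySem.Set.ofList [362])]

-- the parsing loop is textually identical in A and B, so both ports share it
def pvParseNums (cwes : List String) : List Int :=
  cwes.foldl (fun nums c =>
    if PySem.Str.startswith c "CWE-" then
      match PySem.Int.ofStr? (PySem.Str.replace c "CWE-" "") with
      | some v => nums ++ [v]
      | none => nums
    else nums) []

def pvFamScan (nums : List Int) : List (String × PySem.Set Int) → String
  | [] => "other"
  | (fam, cweSet) :: rest =>
      if nums.any (fun n => PySem.Set.contains cweSet n) then fam else pvFamScan nums rest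

def family_for (cwes : List String) : String :=
  if cwes.isEmpty then "unknown"
  else
    let nums := pvParseNums cwes
    if nums.isEmpty then "unknown"
    else pvFamScan nums CWE_FAMILIES

-- ===== PORT B =====
def CWE_TO_RANK : PySem.Dict Int (Int × String) :=
  (PySem.List.enumerate CWE_FAMILIES).foldl
    (fun d p => p.2.2.foldl (fun d n => d.insert n (p.1, p.2.1)) d) PySem.Dict.empty

def pvBestStep (best : Option (Int × String)) (n : Int) : Option (Int × String) :=
  match CWE_TO_RANK.get? n with
  | some hit =>
      match best with
      | none => some hit
      | some b => if hit.1 < b.1 then some hit else some b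
  | none => best

def family_for_alt (cwes : List String) : String :=
  if cwes.isEmpty then "unknown"
  else
    let nums := pvParseNums cwes
    if nums.isEmpty then "unknown"
    else
      match nums.foldl pvBestStep none with
      | some b => b.2
      | none => "other"

-- ===== PRECONDITION & SPEC =====
def Spec_family_for (cwes : List String) (out : String) : Prop := out = family_for_alt cwes
instance (cwes : List String) (out : String) : Decidable (Spec_family_for cwes out) := by unfold Spec_family_for; infer_instance

-- ===== CLAIM (what is proved, stated in full; the proofs are below) =====
def Claim_equal_family_for : Prop := ∀ (cwes : List String), Dom_family_for cwes → Spec_family_for cwes (family_for cwes)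

-- ===== LEMMAS AND PROOFS =====

-- the family list as blocks of (value = (rank, family), keys)
def pvBlocks : List ((Int × String) × List Int) :=
  [(((0 : Int), "memory_corruption"), [119, 120, 122, 125, 190, 416, 476, 787, 824]),
   (((1 : Int), "injection"),         [77, 78, 79, 89, 94, 917]),
   (((2 : Int), "auth"),              [287, 269, 306, 862, 863]),
   (((3 : Int), "path_traversal"),    [22, 23, 36]),
   (((4 : Int), "deserialization"),   [502]),
   (((5 : Int), "info_disclosure"),   [200, 209]),
   (((6 : Int), "ssrf"),              [918]),
   (((7 : Int), "race"),              [362])]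

def pvChain (n : Int) : List ((Int × String) × List Int) → Option (Int × String)
  | [] => none
  | (v, ks) :: rest => if ks.contains n then some v else pvChain n rest

def pvStepC (blocks : List ((Int × String) × List Int))
    (best : Option (Int × String)) (n : Int) : Option (Int × String) :=
  match pvChain n blocks with
  | some hit =>
      match best with
      | none => some hit
      | some b => if hit.1 < b.1 then some hit else some b
  | none => best

def pvOut : Option (Int × String) → String
  | some b => b.2
  | none => "other"

def pvFamScanC (nums : List Int) : List ((Int × String) × List Int) → String
  | [] => "other"
  | (v, ks) :: rest => if nums.any (fun n => ks.contains n) then v.2 else pvFamScanC nums rest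

def pvSortedBlocks : List ((Int × String) × List Int) → Prop
  | [] => True
  | b :: rest => (∀ b' ∈ rest, b.1.1 < b'.1.1) ∧ pvSortedBlocks rest

lemma pv_get?_mk_map_append (ks : List Int) (v : Int × String)
    (rest : List (Int × (Int × String))) (n : Int) :
    (PySem.Dict.mk (ks.map (fun k => (k, v)) ++ rest)).get? n =
      if ks.contains n then some v else (PySem.Dict.mk rest).get? n := by
  induction ks with
  | nil => simp
  | cons k ks ih =>
      simp only [List.map_cons, List.cons_append, PySem.Dict.get?_mk_cons, ih,
        List.contains_cons]
      by_cases h : k = n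
      · subst h; simp
      · simp [beq_iff_eq, h, Ne.symm h]

lemma pv_get?_mk_flatMap (blocks : List ((Int × String) × List Int)) (n : Int) :
    (PySem.Dict.mk (blocks.flatMap (fun b => b.2.map (fun k => (k, b.1))))).get? n =
      pvChain n blocks := by
  induction blocks with
  | nil => simp [pvChain, PySem.Dict.get?]
  | cons b rest ih =>
      obtain ⟨v, ks⟩ := b
      simp only [List.flatMap_cons, pvChain, pv_get?_mk_map_append, ih]

lemma pv_dict_eq :
    CWE_TO_RANK = PySem.Dict.mk (pvBlocks.flatMap (fun b => b.2.map (fun k => (k, b.1)))) := by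
  decide

lemma pv_get?_chain (n : Int) : CWE_TO_RANK.get? n = pvChain n pvBlocks := by
  rw [pv_dict_eq, pv_get?_mk_flatMap]

lemma pv_step_eq : pvBestStep = pvStepC pvBlocks := by
  funext best n
  simp only [pvBestStep, pvStepC, pv_get?_chain]

lemma pv_chain_mem {n : Int} {blocks : List ((Int × String) × List Int)} {g : Int × String}
    (h : pvChain n blocks = some g) : ∃ b ∈ blocks, g = b.1 := by
  induction blocks with
  | nil => simp [pvChain] at h
  | cons b rest ih =>
      obtain ⟨v, ks⟩ := b
      simp only [pvChain] at h
      split_ifs at h with hc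
      · exact ⟨(v, ks), by simp, by simpa using h.symm⟩
      · obtain ⟨b', hb', hg⟩ := ih h
        exact ⟨b', by simp [hb'], hg⟩

-- once the accumulator is the minimal-rank value, it stays
lemma pv_loop_keep (blocks : List ((Int × String) × List Int)) (v : Int × String)
    (hmin : ∀ (n : Int) (g : Int × String), pvChain n blocks = some g → v.1 < g.1 ∨ g = v) :
    ∀ nums : List Int, nums.foldl (pvStepC blocks) (some v) = some v := by
  intro nums
  induction nums with
  | nil => rfl
  | cons n t ih =>
      have hstep : pvStepC blocks (some v) n = some v := by
        unfold pvStepC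
        cases hc : pvChain n blocks with
        | none => rfl
        | some g =>
            rcases hmin n g hc with h | h
            · simp [not_lt.mpr (le_of_lt h)]
            · simp [h]
      simpa [List.foldl_cons, hstep] using ih

lemma pv_loop_reach (blocks : List ((Int × String) × List Int)) (v : Int × String)
    (hmin : ∀ (n : Int) (g : Int × String), pvChain n blocks = some g → v.1 < g.1 ∨ g = v) :
    ∀ (nums : List Int) (acc : Option (Int × String)),
      (∀ b : Int × String, acc = some b → v.1 < b.1 ∨ b = v) →
      ((∃ n ∈ nums, pvChain n blocks = some v) ∨ acc = some v) →
      nums.foldl (pvStepC blocks) acc = some v := by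
  intro nums
  induction nums with
  | nil =>
      intro acc _ hw
      rcases hw with ⟨n, hn, _⟩ | h
      · simp at hn
      · simpa using h
  | cons n t ih =>
      intro acc hacc hw
      rw [List.foldl_cons]
      have hstep_inv : ∀ b : Int × String, pvStepC blocks acc n = some b → v.1 < b.1 ∨ b = v := by
        intro b hb
        unfold pvStepC at hb
        cases hc : pvChain n blocks with
        | none => rw [hc] at hb; exact hacc b hb
        | some g =>
            rw [hc] at hb
            cases acc with
            | none => simp at hb; subst hb; exact hmin n g hc
            | some a =>
                simp at hb
                split_ifs at hb <;> simp at hb <;> subst hb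
                · exact hmin n g hc
                · exact hacc a rfl
      by_cases hvacc : acc = some v ∨ pvChain n blocks = some v
      · -- step produces some v
        have hstep : pvStepC blocks acc n = some v := by
          unfold pvStepC
          rcases hvacc with h | h
          · subst h
            cases hc : pvChain n blocks with
            | none => rfl
            | some g =>
                rcases hmin n g hc with hlt | heq
                · simp [not_lt.mpr (le_of_lt hlt)]
                · simp [heq]
          · rw [h]
            cases acc with
            | none => rfl
            | some a =>
                rcases hacc a rfl with hlt | heq
                · simp [hlt]
                · simp [heq]
        rw [hstep]
        exact pv_loop_keep blocks v hmin t
      · push Not at hvacc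
        rcases hw with ⟨n0, hn0, hcn0⟩ | h
        · rcases List.mem_cons.mp hn0 with rfl | hmem
          · exact absurd hcn0 hvacc.2
          · exact ih _ hstep_inv (Or.inl ⟨n0, hmem, hcn0⟩)
        · exact absurd h hvacc.1

lemma pv_loop_skip (v : Int × String) (ks : List Int)
    (rest : List ((Int × String) × List Int)) (nums : List Int)
    (h : ∀ n ∈ nums, ks.contains n = false) (acc : Option (Int × String)) :
    nums.foldl (pvStepC ((v, ks) :: rest)) acc = nums.foldl (pvStepC rest) acc := by
  induction nums generalizing acc with
  | nil => rfl
  | cons n t ih =>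
      have hchain : pvChain n ((v, ks) :: rest) = pvChain n rest := by
        have := h n (by simp)
        simp only [pvChain, this]
        simp
      have hstep : pvStepC ((v, ks) :: rest) acc n = pvStepC rest acc n := by
        simp only [pvStepC, hchain]
      rw [List.foldl_cons, List.foldl_cons, hstep]
      exact ih (fun m hm => h m (by simp [hm])) _

theorem pv_main_generic : ∀ blocks : List ((Int × String) × List Int),
    pvSortedBlocks blocks → ∀ nums : List Int,
    pvFamScanC nums blocks = pvOut (nums.foldl (pvStepC blocks) none) := by
  intro blocks
  induction blocks with
  | nil =>
      intro _ nums
      have : nums.foldl (pvStepC []) none = none := by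
        induction nums with
        | nil => rfl
        | cons n t ih => simpa [List.foldl_cons, pvStepC, pvChain] using ih
      simp [pvFamScanC, this, pvOut]
  | cons b rest ih =>
      intro hs nums
      obtain ⟨v, ks⟩ := b
      obtain ⟨hgt, hrest⟩ := hs
      cases hany : nums.any (fun n => ks.contains n) with
      | true =>
        obtain ⟨n0, hn0, hc0⟩ := List.any_eq_true.mp hany
        have hmin : ∀ (n : Int) (g : Int × String),
            pvChain n ((v, ks) :: rest) = some g → v.1 < g.1 ∨ g = v := by
          intro n g hg
          unfold pvChain at hg
          split_ifs at hg with hc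
          · right; simpa using hg.symm
          · obtain ⟨b', hb', rfl⟩ := pv_chain_mem hg
            exact Or.inl (hgt b' hb')
        have hc0' : ks.contains n0 = true := hc0
        have hchain0 : pvChain n0 ((v, ks) :: rest) = some v := by
          simp only [pvChain, hc0']
          simp
        rw [pv_loop_reach _ v hmin nums none (by simp) (Or.inl ⟨n0, hn0, hchain0⟩)]
        unfold pvFamScanC
        rw [hany]
        simp [pvOut]
      | false =>
        have hall : ∀ n ∈ nums, ks.contains n = false := by
          intro n hn
          by_contra hne
          rw [List.any_eq_true.mpr ⟨n, hn, by simpa using hne⟩] at hany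
          exact Bool.true_eq_false.mp hany
        rw [pv_loop_skip v ks rest nums hall none]
        have hsc : pvFamScanC nums ((v, ks) :: rest) = pvFamScanC nums rest := by
          show (if nums.any (fun n => ks.contains n) then v.2 else pvFamScanC nums rest) =
            pvFamScanC nums rest
          rw [hany]
          simp
        rw [hsc, ih hrest nums]

lemma pv_famscan_eq (nums : List Int) :
    pvFamScan nums CWE_FAMILIES = pvFamScanC nums pvBlocks := by
  simp [pvFamScan, pvFamScanC, CWE_FAMILIES, pvBlocks, PySem.Set.contains, PySem.Set.ofList]

lemma pv_sorted : pvSortedBlocks pvBlocks := by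
  simp only [pvBlocks, pvSortedBlocks]
  refine ⟨?_, ?_, ?_, ?_, ?_, ?_, ?_, ?_⟩ <;> trivial

-- ===== VERDICT (by name: the statement is the Claim_ definition above) =====
theorem family_for_spec : Claim_equal_family_for := by
  intro cwes _
  unfold Spec_family_for family_for family_for_alt
  by_cases h1 : cwes.isEmpty
  · simp [h1]
  · simp only [h1, Bool.false_eq_true, if_false]
    by_cases h2 : (pvParseNums cwes).isEmpty
    · simp [h2]
    · simp only [h2, Bool.false_eq_true, if_false]
      rw [pv_step_eq, pv_famscan_eq, pv_main_generic pvBlocks pv_sorted]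
      cases (pvParseNums cwes).foldl (pvStepC pvBlocks) none <;> simp [pvOut]
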